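-- pv_equiv track=rewrite | github.com/mtitze/accphys | accphys/io/convert.py | combine_adjacent_elements
-- ===== SOURCE A (Python) =====
-- def combine_adjacent_elements(elist, info=True):
--     '''
--     Combine adjecent elements in an overal list, if they contain the same information besides
--     of their lengths.
--
--     Parameters
--     ----------
--     elist: list
--         A list of dictionaries, each containing information for the construction of an accphys element.
--
--     info: boolean, optional
--         Display some information.
--
--     Returns
--     -------
--     list
--         A new list in which suitable neighbouring elements have been combined.
--     '''
--     e0 = {}
--     e0_length = 0
--     indices_to_be_removed = [] # store information of those indices in the original list which must be removed.
--     j = 0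
--     n_combined = 0 # count the number of elements to be combined to display this number to the user later.
--     for e in elist:
--         ee = {k: v for k, v in e.items() if k != 'length'}
--         if ee == e0 and j > 0:
--             e['length'] = e.get('length', 0) + e0_length
--             indices_to_be_removed.append(j - 1)
--             n_combined += 1
--         e0_length = e.get('length', 0)
--         e0 = ee
--         j += 1
--     if info and n_combined > 0:
--         print (f'{n_combined} elements have been combined.')
--     return [elist[j] for j in range(len(elist)) if j not in indices_to_be_removed]
-- ===== SOURCE B (Python) =====
-- def combine_adjacent_elements(elist, info=True):
--     '''Run-based re-implementation: find each maximal run of adjacent elements that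
--     agree outside 'length', keep the run's last element (setting its length to the
--     run's total only when the run has more than one member).'''
--     res = []
--     n_combined = 0
--     i, n = 0, len(elist)
--     key = lambda e: {k: v for k, v in e.items() if k != 'length'}
--     while i < n:
--         j = i + 1
--         while j < n and key(elist[j]) == key(elist[j - 1]):
--             j += 1
--         last = elist[j - 1]
--         if j - i > 1:
--             last['length'] = sum(m.get('length', 0) for m in elist[i:j])
--             n_combined += j - i - 1
--         res.append(last)
--         i = j
--     if info and n_combined > 0:
--         print(f'{n_combined} elements have been combined.')
--     return res
-- ===== Notes on version B (the rewrite author's own statement) =====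
-- stated objective: alternative
-- what changed: Replaces A's single pass with predecessor-comparison, in-place cumulative length mutation and a removal-index list filtered out at the end by a run-based scan: each maximal run of adjacent elements equal outside 'length' is located, its last element is kept and (only for runs of more than one element) given the run's total length in one summation.
import Mathlib
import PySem

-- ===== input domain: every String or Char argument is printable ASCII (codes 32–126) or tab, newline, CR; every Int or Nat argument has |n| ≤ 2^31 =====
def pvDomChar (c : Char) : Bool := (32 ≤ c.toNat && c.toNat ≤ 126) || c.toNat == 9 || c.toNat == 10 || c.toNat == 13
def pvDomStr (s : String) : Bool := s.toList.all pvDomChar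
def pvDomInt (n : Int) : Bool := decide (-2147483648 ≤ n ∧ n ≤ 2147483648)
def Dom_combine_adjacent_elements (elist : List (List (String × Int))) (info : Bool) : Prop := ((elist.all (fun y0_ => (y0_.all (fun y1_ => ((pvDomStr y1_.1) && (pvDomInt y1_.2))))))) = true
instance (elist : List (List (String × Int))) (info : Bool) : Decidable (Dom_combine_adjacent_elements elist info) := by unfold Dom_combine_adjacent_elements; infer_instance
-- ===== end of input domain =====

-- B replaces A's predecessor-comparison pass (with in-place cumulative length updates and a
-- removal-index list filtered out at the end) by a run-based scan: each maximal run of adjacent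
-- elements equal outside 'length' keeps its last element, with the run's total length set in one
-- summation when the run has more than one member. Equivalence is about the RETURN value only:
-- A also mutates the 'length' of run elements that are dropped, B does not touch dropped elements.

-- shared by both ports: Python's dict == (mapping equality, insertion order ignored)
def pvDictEq (d d' : PySem.Dict String Int) : Bool :=
  d.size == d'.size && d.items.all (fun kv => d'.get? kv.1 == some kv.2)

-- shared by both ports: {k: v for k, v in e.items() if k != 'length'}
def pvStripLength (e : PySem.Dict String Int) : PySem.Dict String Int :=
  PySem.Dict.ofList (e.items.filter (fun kv => !(kv.1 == "length")))

-- ===== PORT A =====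
-- the for-loop of A: state (e0, e0_length, indices_to_be_removed, j, n_combined);
-- returns (the list with its in-place 'length' mutations, indices_to_be_removed, n_combined)
def pvLoopA : List (PySem.Dict String Int) → PySem.Dict String Int → Int → List Nat → Nat → Int →
    List (PySem.Dict String Int) × List Nat × Int
  | [], _e0, _e0len, removed, _j, n => ([], removed, n)
  | e :: rest, e0, e0len, removed, j, n =>
    let ee := pvStripLength e
    if pvDictEq ee e0 && decide (0 < j) then
      let e' := e.insert "length" (e.getD "length" 0 + e0len)
      let r := pvLoopA rest ee (e'.getD "length" 0) (removed ++ [j - 1]) (j + 1) (n + 1)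
      (e' :: r.1, r.2)
    else
      let r := pvLoopA rest ee (e.getD "length" 0) removed (j + 1) n
      (e :: r.1, r.2)

def combine_adjacent_elements (elist : List (List (String × Int))) (info : Bool) : List (List (String × Int)) :=
  let ds := elist.map PySem.Dict.ofList
  let r := pvLoopA ds PySem.Dict.empty 0 [] 0 0
  -- `if info and n_combined > 0: print(...)` is a side effect only
  ((List.range r.1.length).filter (fun i => !(r.2.1.contains i))).map
    (fun i => (r.1.getD i PySem.Dict.empty).items)

-- ===== PORT B =====
-- the inner while of B: the rest of the run of elements adjacent-equal (outside 'length') to prev,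
-- and the remainder of the list
def pvSpan : PySem.Dict String Int → List (PySem.Dict String Int) →
    List (PySem.Dict String Int) × List (PySem.Dict String Int)
  | _prev, [] => ([], [])
  | prev, x :: xs =>
    if pvDictEq (pvStripLength x) (pvStripLength prev) then
      let r := pvSpan x xs
      (x :: r.1, r.2)
    else ([], x :: xs)

theorem pvSpan_snd_length_le (prev : PySem.Dict String Int) (l : List (PySem.Dict String Int)) :
    (pvSpan prev l).2.length ≤ l.length := by
  induction l generalizing prev with
  | nil => simp [pvSpan]
  | cons x xs ih =>
    simp only [pvSpan]
    split
    · exact le_trans (ih x) (Nat.le_succ _)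
    · simp

-- the outer while of B: the maximal runs of adjacent equal elements
def pvGroups : List (PySem.Dict String Int) → List (List (PySem.Dict String Int))
  | [] => []
  | e :: rest =>
    let r := pvSpan e rest
    (e :: r.1) :: pvGroups r.2
termination_by l => l.length
decreasing_by
  simpa using Nat.lt_succ_of_le (pvSpan_snd_length_le e rest)

-- the body of B's outer loop for one run: keep the last element, summing lengths if combined
def pvProcessGroup (g : List (PySem.Dict String Int)) : PySem.Dict String Int :=
  let last := g.getLastD PySem.Dict.empty
  if 1 < g.length then last.insert "length" ((g.map (fun m => m.getD "length" 0)).sum) else last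

def combine_adjacent_elements_alt (elist : List (List (String × Int))) (info : Bool) : List (List (String × Int)) :=
  ((pvGroups (elist.map PySem.Dict.ofList)).map pvProcessGroup).map (fun d => d.items)

-- ===== PRECONDITION & SPEC =====
def Spec_combine_adjacent_elements (elist : List (List (String × Int))) (info : Bool) (out : List (List (String × Int))) : Prop := out = combine_adjacent_elements_alt elist info
instance (elist : List (List (String × Int))) (info : Bool) (out : List (List (String × Int))) : Decidable (Spec_combine_adjacent_elements elist info out) := by unfold Spec_combine_adjacent_elements; infer_instance

-- ===== CLAIM (what is proved, stated in full; the proofs are below) =====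
def Claim_equal_combine_adjacent_elements : Prop := ∀ (elist : List (List (String × Int))) (info : Bool), Dom_combine_adjacent_elements elist info → Spec_combine_adjacent_elements elist info (combine_adjacent_elements elist info)

-- ===== LEMMAS AND PROOFS =====

-- the final comprehension of A, as a structural recursion with an index offset
def pvPick : List (PySem.Dict String Int) → List Nat → Nat → List (PySem.Dict String Int)
  | [], _, _ => []
  | x :: xs, removed, j =>
    if removed.contains j then pvPick xs removed (j + 1) else x :: pvPick xs removed (j + 1)

theorem pvPick_eq (acc : List (PySem.Dict String Int)) (removed : List Nat) (j : Nat) :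
    ((List.range acc.length).filter (fun i => !(removed.contains (i + j)))).map
      (fun i => acc.getD i PySem.Dict.empty) = pvPick acc removed j := by
  induction acc generalizing j with
  | nil => simp [pvPick]
  | cons x xs ih =>
    simp only [pvPick, List.length_cons, List.range_succ_eq_map, List.filter_cons,
      List.filter_map]
    have h1 : (fun i => !(removed.contains (i + j))) ∘ Nat.succ
        = fun i => !(removed.contains (i + (j + 1))) := by
      funext i
      simp only [Function.comp_apply]
      rw [show i.succ + j = i + (j + 1) from by omega]
    rw [h1]
    by_cases hj : j ∈ removed
    · simp [List.contains_eq_mem, hj, ← ih (j + 1), List.map_map, Function.comp]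
    · simp [List.contains_eq_mem, hj, ← ih (j + 1), List.map_map, Function.comp]

theorem pvFilterMapStrip (l : List (String × Int)) (v : Int) :
    (l.map (fun p => if p.1 == "length" then ("length", v) else p)).filter
      (fun kv => !(kv.1 == "length"))
      = l.filter (fun kv => !(kv.1 == "length")) := by
  induction l with
  | nil => rfl
  | cons kv t ih =>
    simp only [beq_iff_eq] at ih ⊢
    by_cases h : kv.1 = "length"
    · simp [h, ih]
    · simp [h, ih]

theorem pvStripLength_insert (e : PySem.Dict String Int) (v : Int) :
    pvStripLength (e.insert "length" v) = pvStripLength e := by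
  unfold pvStripLength
  congr 1
  rw [PySem.Dict.items_insert]
  split
  · exact pvFilterMapStrip e.items v
  · simp

theorem pvSpan_congr (a b : PySem.Dict String Int) (l : List (PySem.Dict String Int))
    (h : pvStripLength a = pvStripLength b) : pvSpan a l = pvSpan b l := by
  cases l with
  | nil => rfl
  | cons x xs => simp only [pvSpan, h]

-- The loop invariant: starting just after an element cur whose (possibly already mutated)
-- running length is cur.getD "length" 0, A's loop produces, from index j on, exactly B's
-- run-based output for cur :: rest, and only removes indices ≥ j.
theorem pvRun (rest : List (PySem.Dict String Int)) (cur : PySem.Dict String Int)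
    (j : Nat) (removed : List Nat) (n : Int) (hrem : ∀ s ∈ removed, s < j) :
    (pvPick (cur :: (pvLoopA rest (pvStripLength cur) (cur.getD "length" 0) removed (j + 1) n).1)
        (pvLoopA rest (pvStripLength cur) (cur.getD "length" 0) removed (j + 1) n).2.1 j
      = (pvGroups (cur :: rest)).map pvProcessGroup)
    ∧ ∃ extra, (pvLoopA rest (pvStripLength cur) (cur.getD "length" 0) removed (j + 1) n).2.1
        = removed ++ extra ∧ ∀ s ∈ extra, j ≤ s := by
  induction rest generalizing cur j removed n with
  | nil =>
    constructor
    · have hj : j ∉ removed := fun hmem => absurd (hrem j hmem) (lt_irrefl j)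
      simp [pvLoopA, pvPick, List.contains_eq_mem, hj, pvGroups, pvSpan, pvProcessGroup]
    · exact ⟨[], by simp [pvLoopA], by simp⟩
  | cons x xs ih =>
    by_cases hc : pvDictEq (pvStripLength x) (pvStripLength cur) = true
    · -- x continues the run
      have hloop : pvLoopA (x :: xs) (pvStripLength cur) (cur.getD "length" 0) removed (j + 1) n
          = (let e' := x.insert "length" (x.getD "length" 0 + cur.getD "length" 0)
             let r := pvLoopA xs (pvStripLength x) (e'.getD "length" 0) (removed ++ [j]) (j + 2) (n + 1)
             (e' :: r.1, r.2)) := by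
        simp [pvLoopA, hc]
      set e' := x.insert "length" (x.getD "length" 0 + cur.getD "length" 0) with he'
      have hkey : pvStripLength e' = pvStripLength x := pvStripLength_insert x _
      have hlen : e'.getD "length" 0 = x.getD "length" 0 + cur.getD "length" 0 := by
        rw [he']; simp [pysem]
      have hrem' : ∀ s ∈ removed ++ [j], s < j + 1 := by
        intro s hs
        rcases List.mem_append.mp hs with h | h
        · exact Nat.lt_succ_of_lt (hrem s h)
        · simp at h; omega
      have ihx := ih e' (j + 1) (removed ++ [j]) (n + 1) hrem'
      rw [hkey, hlen] at ihx
      obtain ⟨ihpick, extra, hext, hge⟩ := ihx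
      have hloop2 : pvLoopA (x :: xs) (pvStripLength cur) (cur.getD "length" 0) removed (j + 1) n
          = ((e' :: (pvLoopA xs (pvStripLength x) (x.getD "length" 0 + cur.getD "length" 0)
              (removed ++ [j]) (j + 2) (n + 1)).1),
             (pvLoopA xs (pvStripLength x) (x.getD "length" 0 + cur.getD "length" 0)
              (removed ++ [j]) (j + 2) (n + 1)).2) := by
        rw [hloop]; simp [hlen]
      rw [hloop2]
      set r2 := pvLoopA xs (pvStripLength x) (x.getD "length" 0 + cur.getD "length" 0)
        (removed ++ [j]) (j + 2) (n + 1) with hr2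
      constructor
      · -- pick: index j is removed
        have hjmem : j ∈ r2.2.1 := by rw [hext]; simp
        have hpick1 : pvPick (cur :: e' :: r2.1) r2.2.1 j = pvPick (e' :: r2.1) r2.2.1 (j + 1) := by
          simp [pvPick, List.contains_eq_mem, hjmem]
        rw [hpick1, ihpick]
        -- B side: pvGroups (cur :: x :: xs) groups cur with x's run
        have hgroups : pvGroups (cur :: x :: xs)
            = (cur :: x :: (pvSpan x xs).1) :: pvGroups (pvSpan x xs).2 := by
          rw [pvGroups]; simp [pvSpan, hc]
        have hgroups' : pvGroups (e' :: xs)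
            = (e' :: (pvSpan x xs).1) :: pvGroups (pvSpan x xs).2 := by
          rw [pvGroups]; simp [pvSpan_congr e' x xs hkey]
        rw [hgroups, hgroups']
        simp only [List.map_cons]
        congr 1
        -- heads: the processed run elements agree
        cases hs1 : (pvSpan x xs).1 with
        | nil =>
          simp only [pvProcessGroup, List.length_cons, List.length_nil, List.getLastD]
          norm_num
          rw [he']
          congr 1
          ring
        | cons y t =>
          simp only [pvProcessGroup, List.length_cons, List.map_cons, List.sum_cons]
          norm_num
          congr 1
          rw [hlen]
          ring
      · exact ⟨[j] ++ extra, by rw [hext]; simp, by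
          intro s hs
          rcases List.mem_append.mp hs with h | h
          · simp at h; omega
          · exact Nat.le_of_succ_le (hge s h)⟩
    · -- x starts a new run
      have hc' : pvDictEq (pvStripLength x) (pvStripLength cur) = false := by
        simpa using hc
      have hloop : pvLoopA (x :: xs) (pvStripLength cur) (cur.getD "length" 0) removed (j + 1) n
          = ((x :: (pvLoopA xs (pvStripLength x) (x.getD "length" 0) removed (j + 2) n).1),
             (pvLoopA xs (pvStripLength x) (x.getD "length" 0) removed (j + 2) n).2) := by
        simp [pvLoopA, hc']
      rw [hloop]
      have hrem' : ∀ s ∈ removed, s < j + 1 := fun s hs => Nat.lt_succ_of_lt (hrem s hs)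
      obtain ⟨ihpick, extra, hext, hge⟩ := ih x (j + 1) removed n hrem'
      set r2 := pvLoopA xs (pvStripLength x) (x.getD "length" 0) removed (j + 2) n with hr2
      constructor
      · have hjmem : j ∉ r2.2.1 := by
          rw [hext]
          intro hmem
          rcases List.mem_append.mp hmem with h | h
          · exact absurd (hrem j h) (lt_irrefl j)
          · exact absurd (hge j h) (by omega)
        have hpick1 : pvPick (cur :: x :: r2.1) r2.2.1 j
            = cur :: pvPick (x :: r2.1) r2.2.1 (j + 1) := by
          simp [pvPick, List.contains_eq_mem, hjmem]
        rw [hpick1, ihpick]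
        have hgroups : pvGroups (cur :: x :: xs) = [cur] :: pvGroups (x :: xs) := by
          rw [pvGroups]; simp [pvSpan, hc']
        rw [hgroups]
        simp [pvProcessGroup, List.getLastD]
      · exact ⟨extra, hext, fun s hs => Nat.le_of_succ_le (hge s hs)⟩

-- ===== VERDICT (by name: the statement is the Claim_ definition above) =====
theorem combine_adjacent_elements_spec : Claim_equal_combine_adjacent_elements := by
  intro elist info _hdom
  unfold Spec_combine_adjacent_elements combine_adjacent_elements combine_adjacent_elements_alt
  cases hds : elist.map PySem.Dict.ofList with
  | nil => simp [pvLoopA, pvGroups]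
  | cons e rest =>
    simp only [hds]
    have hloop : pvLoopA (e :: rest) PySem.Dict.empty 0 [] 0 0
        = ((e :: (pvLoopA rest (pvStripLength e) (e.getD "length" 0) [] 1 0).1),
           (pvLoopA rest (pvStripLength e) (e.getD "length" 0) [] 1 0).2) := by
      simp [pvLoopA]
    rw [hloop]
    obtain ⟨ihpick, -⟩ := pvRun rest e 0 [] 0 (by simp)
    rw [show (1 : Nat) = 0 + 1 from rfl] at ihpick
    set r2 := pvLoopA rest (pvStripLength e) (e.getD "length" 0) [] (0 + 1) 0 with hr2
    have hbridge := pvPick_eq (e :: r2.1) r2.2.1 0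
    simp only [Nat.add_zero] at hbridge
    have hb2 := congrArg (List.map (fun d : PySem.Dict String Int => d.items)) hbridge
    simp only [List.map_map] at hb2
    exact hb2.trans (by rw [ihpick])
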